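-- pv_equiv track=rewrite | github.com/mmdoogie/everybody-codes | ec_2024/ec_2024_07.py | run_pat_on_track_faster
-- ===== SOURCE A (Python) =====
-- from itertools import cycle, product
-- from math import lcm
--
-- def run_pat_on_track(track, pat, loops=10):
--     pwr = 10
--     tot = 0
--     pat = cycle(pat)
--
--     for _ in range(loops):
--         for t_act in track:
--             c_act = next(pat)
--
--             if t_act == '+':
--                 c_act = '+'
--             elif t_act == '-':
--                 c_act = '-'
--
--             if c_act == '+':
--                 pwr += 1
--             elif c_act == '-' and pwr > 0:
--                 pwr -= 1
--
--             tot += pwr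
--     return tot, pwr
--
-- def run_pat_on_track_faster(track, pat, loops):
--     track_len = len(track)
--     incr_rounds = lcm(track_len, len(pat)) // len(track)
--     assert loops % incr_rounds == 0
--
--     score_inc, pwr = run_pat_on_track(track, pat, incr_rounds)
--     score = score_inc
--     pwr_inc = pwr - 10
--     for _ in range(loops // incr_rounds - 1):
--         score += score_inc + (pwr - 10) * track_len * incr_rounds
--         pwr += pwr_inc
--     return score
-- ===== SOURCE B (Python) =====
-- from math import lcm
--
-- def run_pat_on_track_faster(track, pat, loops):
--     L = len(track)
--     P = len(pat)
--     R = lcm(L, P) // L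
--     assert loops % R == 0
--     # one full period of L*R steps, plain index arithmetic instead of nested loops + cycle()
--     pwr = 10
--     score = 0
--     for j in range(L * R):
--         t = track[j % L]
--         if t == '+':
--             pwr += 1
--         elif t == '-':
--             if pwr > 0:
--                 pwr -= 1
--         else:
--             c = pat[j % P]
--             if c == '+':
--                 pwr += 1
--             elif c == '-' and pwr > 0:
--                 pwr -= 1
--         score += pwr
--     pwr_inc = pwr - 10
--     # closed-form arithmetic series instead of the per-period extrapolation loop
--     n = max(loops // R - 1, 0)
--     return (n + 1) * score + L * R * pwr_inc * (n * (n + 1) // 2)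
-- ===== Notes on version B (the rewrite author's own statement) =====
-- stated objective: alternative
-- what changed: B replaces A's nested per-loop/per-char simulation with a cycle() iterator by a single indexed pass over one lcm-period, and replaces A's per-period extrapolation loop by a closed-form arithmetic-series formula (the lcm-period simulation still dominates, so the cost is unchanged on large tracks).
import Mathlib
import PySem

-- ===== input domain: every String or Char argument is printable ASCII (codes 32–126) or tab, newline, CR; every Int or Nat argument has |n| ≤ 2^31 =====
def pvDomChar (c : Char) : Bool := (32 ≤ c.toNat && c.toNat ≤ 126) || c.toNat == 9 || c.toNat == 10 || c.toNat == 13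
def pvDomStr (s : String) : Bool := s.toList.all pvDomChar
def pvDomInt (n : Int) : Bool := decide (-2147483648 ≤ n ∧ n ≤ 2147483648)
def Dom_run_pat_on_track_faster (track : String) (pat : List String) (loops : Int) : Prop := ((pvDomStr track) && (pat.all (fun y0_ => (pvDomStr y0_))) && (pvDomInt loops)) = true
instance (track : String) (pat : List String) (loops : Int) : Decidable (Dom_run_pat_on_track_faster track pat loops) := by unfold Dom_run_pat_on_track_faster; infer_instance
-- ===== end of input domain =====

-- B replaces A's nested simulation loops + cycle() iterator by a single indexed pass over one
-- lcm-period, and A's per-period extrapolation loop by a closed-form arithmetic series.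

-- ===== PORT A =====
-- body of run_pat_on_track's inner loop; state = (pwr, tot, pat-cycle index)
def rpotStep (pat : List String) (st : Int × Int × Nat) (t_act : Char) : Int × Int × Nat :=
  let c_act := pat.getD st.2.2 ""
  let c_act := if t_act = '+' then "+" else if t_act = '-' then "-" else c_act
  let pwr := if c_act = "+" then st.1 + 1
             else if c_act = "-" ∧ st.1 > 0 then st.1 - 1 else st.1
  (pwr, st.2.1 + pwr, (st.2.2 + 1) % pat.length)

-- run_pat_on_track(track, pat, loops) → (tot, pwr); cycle(pat) is ported as an index mod len(pat)
def run_pat_on_track (track : String) (pat : List String) (loops : Int) : Int × Int :=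
  let st := (PySem.List.pyRange 0 loops 1).foldl
    (fun st _ => track.toList.foldl (rpotStep pat) st) ((10 : Int), (0 : Int), (0 : Nat))
  (st.2.1, st.1)

def run_pat_on_track_faster (track : String) (pat : List String) (loops : Int) : Int :=
  let track_len : Int := track.toList.length
  let incr_rounds : Int := PySem.Int.floordiv (Nat.lcm track.toList.length pat.length : Int) track_len
  -- assert loops % incr_rounds == 0 : excluded by Pre_
  let sp := run_pat_on_track track pat incr_rounds
  let score_inc := sp.1
  let pwr_inc := sp.2 - 10
  let fin := (PySem.List.pyRange 0 (PySem.Int.floordiv loops incr_rounds - 1) 1).foldl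
    (fun (q : Int × Int) _ => (q.1 + score_inc + (q.2 - 10) * track_len * incr_rounds, q.2 + pwr_inc))
    (score_inc, sp.2)
  fin.1

-- ===== PORT B =====
-- body of Source B's single loop; sp = (pwr, score); track[j % L] / pat[j % P] are in range (j ≥ 0)
def altStep (track : String) (pat : List String) (sp : Int × Int) (j : Nat) : Int × Int :=
  let t := track.toList.getD (j % track.toList.length) ' '
  let pwr :=
    if t = '+' then sp.1 + 1
    else if t = '-' then (if sp.1 > 0 then sp.1 - 1 else sp.1)
    else
      let c := pat.getD (j % pat.length) ""
      if c = "+" then sp.1 + 1 else if c = "-" ∧ sp.1 > 0 then sp.1 - 1 else sp.1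
  (pwr, sp.2 + pwr)

def run_pat_on_track_faster_alt (track : String) (pat : List String) (loops : Int) : Int :=
  let L := track.toList.length
  let P := pat.length
  let R := Nat.lcm L P / L
  -- assert loops % R == 0 : excluded by Pre_
  let sp := (List.range (L * R)).foldl (altStep track pat) ((10 : Int), (0 : Int))
  let pwr_inc := sp.1 - 10
  let n : Int := max (PySem.Int.floordiv loops (R : Int) - 1) 0
  (n + 1) * sp.2 + (L : Int) * (R : Int) * pwr_inc * PySem.Int.floordiv (n * (n + 1)) 2

-- ===== PRECONDITION & SPEC =====
-- Pre_ excludes exactly the inputs where the Python A raises: empty track or empty pat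
-- (ZeroDivisionError in `lcm(...) // len(track)` resp. `loops % 0`), and loop counts that are
-- not a multiple of incr_rounds (the explicit `assert` fails with AssertionError).
def Pre_run_pat_on_track_faster (track : String) (pat : List String) (loops : Int) : Prop :=
  track.toList ≠ [] ∧ pat ≠ [] ∧
  ((Nat.lcm track.toList.length pat.length / track.toList.length : Nat) : Int) ∣ loops

instance (track : String) (pat : List String) (loops : Int) :
    Decidable (Pre_run_pat_on_track_faster track pat loops) := by
  unfold Pre_run_pat_on_track_faster; infer_instance

def pvWitness_run_pat_on_track_faster : String × List String × Int := ("+-=x", ["+", "-", "="], 30)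

def Spec_run_pat_on_track_faster (track : String) (pat : List String) (loops : Int) (out : Int) : Prop := out = run_pat_on_track_faster_alt track pat loops
instance (track : String) (pat : List String) (loops : Int) (out : Int) : Decidable (Spec_run_pat_on_track_faster track pat loops out) := by unfold Spec_run_pat_on_track_faster; infer_instance

-- ===== CLAIM (what is proved, stated in full; the proofs are below) =====
def Claim_equal_run_pat_on_track_faster : Prop := ∀ (track : String) (pat : List String) (loops : Int), Dom_run_pat_on_track_faster track pat loops → Pre_run_pat_on_track_faster track pat loops → Spec_run_pat_on_track_faster track pat loops (run_pat_on_track_faster track pat loops)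

-- ===== LEMMAS AND PROOFS =====

-- a fold that ignores its elements is an iteration
theorem pvFoldlConst {α β : Type} (F : α → α) :
    ∀ (l : List β) (a : α), l.foldl (fun a _ => F a) a = F^[l.length] a := by
  intro l
  induction l with
  | nil => intro a; rfl
  | cons x xs ih =>
      intro a
      simp [List.foldl, ih, Function.iterate_succ_apply]

-- a fold over a list is a fold over its indices
theorem pvFoldlIndex {α β : Type} (d : β) (f : α → β → α) :
    ∀ (l : List β) (a : α),
      l.foldl f a = (List.range l.length).foldl (fun a i => f a (l.getD i d)) a := by
  intro l
  induction l with
  | nil => intro a; rfl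
  | cons x xs ih =>
      intro a
      simp [List.foldl, List.range_succ_eq_map, List.foldl_map, ih]

-- one step of A's inner loop, at global step index j, equals one step of B plus the cycle index
theorem pvStepOne (track : String) (pat : List String) (j : Nat) (sp : Int × Int) :
    rpotStep pat (sp.1, sp.2, j % pat.length) (track.toList.getD (j % track.toList.length) ' ')
      = ((altStep track pat sp j).1, (altStep track pat sp j).2, (j + 1) % pat.length) := by
  unfold rpotStep altStep
  generalize track.toList.getD (j % track.toList.length) ' ' = t
  generalize pat.getD (j % pat.length) "" = c
  have hmod : (j % pat.length + 1) % pat.length = (j + 1) % pat.length := by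
    conv_rhs => rw [Nat.add_mod]
    simp
  by_cases h1 : t = '+'
  · simp [h1, hmod]
  · by_cases h2 : t = '-'
    · have hpm : ("-" : String) ≠ "+" := by decide
      simp only [h2, reduceIte]
      simp [hpm, hmod]
    · simp [h1, h2, hmod]

-- m consecutive steps of A starting at global index j
theorem pvSeg (track : String) (pat : List String) :
    ∀ (m j : Nat) (sp : Int × Int),
      (List.range m).foldl
          (fun st i => rpotStep pat st (track.toList.getD ((j + i) % track.toList.length) ' '))
          (sp.1, sp.2, j % pat.length)
        = (((List.range m).foldl (fun sp i => altStep track pat sp (j + i)) sp).1,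
           ((List.range m).foldl (fun sp i => altStep track pat sp (j + i)) sp).2,
           (j + m) % pat.length) := by
  intro m
  induction m with
  | zero => intro j sp; simp
  | succ m ih =>
      intro j sp
      rw [List.range_succ]
      simp only [List.foldl_append, List.foldl_cons, List.foldl_nil]
      rw [ih j sp, pvStepOne track pat (j + m)]
      simp [Nat.add_assoc]

-- one full round over the track, started at a multiple of the track length
theorem pvRound (track : String) (pat : List String) (j : Nat)
    (hj : j % track.toList.length = 0) (sp : Int × Int) :
    track.toList.foldl (rpotStep pat) (sp.1, sp.2, j % pat.length)
      = (((List.range track.toList.length).foldl (fun sp i => altStep track pat sp (j + i)) sp).1,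
         ((List.range track.toList.length).foldl (fun sp i => altStep track pat sp (j + i)) sp).2,
         (j + track.toList.length) % pat.length) := by
  have hc : ∀ (st : Int × Int × Nat) (i : Nat), i ∈ List.range track.toList.length →
      rpotStep pat st (track.toList.getD i ' ')
        = rpotStep pat st (track.toList.getD ((j + i) % track.toList.length) ' ') := by
    intro st i hi
    have hi' : i % track.toList.length = i := Nat.mod_eq_of_lt (List.mem_range.mp hi)
    have hlt : (j + i) % track.toList.length = i := by
      rw [Nat.add_mod, hj, hi', Nat.zero_add, hi']
    rw [hlt]
  rw [pvFoldlIndex ' ' (rpotStep pat) track.toList,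
      List.foldl_ext (fun a i => rpotStep pat a (track.toList.getD i ' '))
        (fun st i => rpotStep pat st (track.toList.getD ((j + i) % track.toList.length) ' '))
        _ hc,
      pvSeg track pat _ j sp]

-- r rounds of A's nested loops = r*L steps of B's flat loop
theorem pvRounds (track : String) (pat : List String) :
    ∀ (r j : Nat), j % track.toList.length = 0 → ∀ (sp : Int × Int),
      (fun st => track.toList.foldl (rpotStep pat) st)^[r] (sp.1, sp.2, j % pat.length)
        = (((List.range (r * track.toList.length)).foldl (fun sp i => altStep track pat sp (j + i)) sp).1,
           ((List.range (r * track.toList.length)).foldl (fun sp i => altStep track pat sp (j + i)) sp).2,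
           (j + r * track.toList.length) % pat.length) := by
  intro r
  induction r with
  | zero => intro j hj sp; simp
  | succ r ih =>
      intro j hj sp
      rw [Function.iterate_succ_apply]
      show (fun st => track.toList.foldl (rpotStep pat) st)^[r]
          (track.toList.foldl (rpotStep pat) (sp.1, sp.2, j % pat.length)) = _
      rw [pvRound track pat j hj sp,
          ih (j + track.toList.length) (by rw [Nat.add_mod_right]; exact hj) _]
      have hsplit : (r + 1) * track.toList.length
          = track.toList.length + r * track.toList.length := by ring
      rw [hsplit, List.range_add]
      simp only [List.foldl_append, List.foldl_map]
      simp [Nat.add_assoc]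

-- triangle numbers
theorem pvTriSucc (m : Nat) : (m + 1) * (m + 2) / 2 = m * (m + 1) / 2 + (m + 1) := by
  have h : (m + 1) * (m + 2) = m * (m + 1) + (m + 1) * 2 := by ring
  rw [h, Nat.add_mul_div_right _ _ (by norm_num)]

-- A's extrapolation loop in closed form
theorem pvExtrap (s p tl ic : Int) :
    ∀ (m : Nat),
      ((fun (q : Int × Int) => (q.1 + s + (q.2 - 10) * tl * ic, q.2 + (p - 10)))^[m] (s, p))
        = ((m + 1 : Int) * s + tl * ic * (p - 10) * ((m * (m + 1) / 2 : Nat) : Int),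
           p + (m : Int) * (p - 10)) := by
  intro m
  induction m with
  | zero => simp
  | succ m ih =>
      rw [Function.iterate_succ_apply', ih]
      simp only [Prod.mk.injEq]
      refine ⟨?_, by push_cast; ring⟩
      have htri : (m + 1) * (m + 1 + 1) / 2 = m * (m + 1) / 2 + (m + 1) := pvTriSucc m
      rw [htri]
      push_cast
      ring

-- ===== VERDICT (by name: the statement is the Claim_ definition above) =====
theorem run_pat_on_track_faster_spec : Claim_equal_run_pat_on_track_faster := by
  intro track pat loops _ hpre
  obtain ⟨htr, hpat, hdvd⟩ := hpre
  unfold Spec_run_pat_on_track_faster run_pat_on_track_faster run_pat_on_track_faster_alt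
    run_pat_on_track
  simp only [PySem.Int.floordiv_natCast]
  set L := track.toList.length with hLdef
  set P := pat.length with hPdef
  set R := L.lcm P / L with hRdef
  set k := PySem.Int.floordiv loops (R : Int) with hkdef
  -- the simulation: A's R rounds over the track = B's single pass over L*R indices
  have h0 : ((10 : Int), (0 : Int), (0 : Nat))
      = (((10 : Int), (0 : Int)).1, ((10 : Int), (0 : Int)).2, 0 % P) := by simp
  rw [pvFoldlConst (fun st => track.toList.foldl (rpotStep pat) st)]
  have hlen : (PySem.List.pyRange 0 (R : Int) 1).length = R := by
    simp [PySem.List.length_pyRange_one]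
  rw [hlen, h0, pvRounds track pat R 0 (Nat.zero_mod L) ((10 : Int), (0 : Int))]
  simp only [Nat.zero_add]
  have heta : (fun (sp : Int × Int) (i : Nat) => altStep track pat sp i) = altStep track pat := rfl
  rw [heta, ← hLdef, Nat.mul_comm R L]
  -- the extrapolation loop in closed form
  rw [pvFoldlConst (fun (q : Int × Int) =>
        (q.1 + (List.foldl (altStep track pat) (10, 0) (List.range (L * R))).2 + (q.2 - 10) * (L : Int) * (R : Int),
         q.2 + ((List.foldl (altStep track pat) (10, 0) (List.range (L * R))).1 - 10)))]
  have hlen2 : (PySem.List.pyRange 0 (k - 1) 1).length = (k - 1).toNat := by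
    simp [PySem.List.length_pyRange_one]
  rw [hlen2, pvExtrap, ← Int.ofNat_toNat (k - 1)]
  have hcast : (((k - 1).toNat * ((k - 1).toNat + 1) : Nat) : Int)
      = ((k - 1).toNat : Int) * (((k - 1).toNat : Int) + 1) := by push_cast; ring
  have hfd : PySem.Int.floordiv (((k - 1).toNat : Int) * (((k - 1).toNat : Int) + 1)) 2
      = (((k - 1).toNat * ((k - 1).toNat + 1) / 2 : Nat) : Int) := by
    rw [← hcast]
    exact_mod_cast PySem.Int.floordiv_natCast ((k - 1).toNat * ((k - 1).toNat + 1)) 2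
  rw [hfd]
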